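-- pv_equiv track=rewrite | github.com/EemeliSaari/SchoolWork | Basics/10_pedometer.py | list_division
-- ===== SOURCE A (Python) =====
-- def list_division(list_variable):
--     """
--     Splits the list for given division range
--     :param list_variable:
--     :return: original list values divided into different subsets
--     """
--
--     base_value = 1000
--     highest_value = sorted(list_variable)[len(list_variable) - 1]
--     divided_list = []
--
--     while base_value < highest_value:
--         compared = list_compare(list_variable, base_value, base_value + 4000)
--         divided_list.append(compared)
--         base_value += 4000
--
--     return divided_list
--
-- def list_compare(list_variable, low, high):
--     """
--     Selects accepted values for given range
--     :param list_variable: list of int values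
--     :param low: lowest compared value
--     :param high: highest compared value
--     :return: list of accepted values
--     """
--     compared_list = []
--     for value in list_variable:
--
--         if low < value < high:
--             compared_list.append(value)
--
--     return compared_list
-- ===== SOURCE B (Python) =====
-- def list_division(list_variable):
--     """
--     Splits the list for given division range
--     :param list_variable:
--     :return: original list values divided into different subsets
--     """
--     highest = max(list_variable)
--     if highest <= 1000:
--         return []
--     buckets = [[] for _ in range((highest - 1001) // 4000 + 1)]
--     for value in list_variable:
--         if value > 1000 and (value - 1000) % 4000 != 0:
--             buckets[(value - 1001) // 4000].append(value)
--     return buckets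
-- ===== Notes on version B (the rewrite author's own statement) =====
-- stated objective: alternative
-- what changed: Instead of sorting to find the maximum and rescanning the whole list once per 4000-wide bucket, B takes max() and makes a single pass placing each value directly into its bucket by the index (value-1001)//4000; it trades A's O(n*b + n log n) nested scans for O(n + b) single-pass bucketing.
import Mathlib
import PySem

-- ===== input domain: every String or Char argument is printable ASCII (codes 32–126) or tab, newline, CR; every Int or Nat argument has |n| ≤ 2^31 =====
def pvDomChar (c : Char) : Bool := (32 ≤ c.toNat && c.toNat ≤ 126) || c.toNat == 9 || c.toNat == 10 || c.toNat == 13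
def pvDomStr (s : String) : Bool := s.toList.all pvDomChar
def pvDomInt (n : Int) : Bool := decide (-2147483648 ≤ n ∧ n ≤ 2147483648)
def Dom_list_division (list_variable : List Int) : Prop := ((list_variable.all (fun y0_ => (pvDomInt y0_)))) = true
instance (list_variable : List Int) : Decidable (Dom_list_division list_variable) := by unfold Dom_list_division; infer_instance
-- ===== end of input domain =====

-- B replaces A's sort-then-rescan-per-bucket with max() and a single direct bucketing pass over the list.

-- ===== PORT A =====
def list_compare (list_variable : List Int) (low : Int) (high : Int) : List Int :=
  list_variable.foldl (fun compared_list value =>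
    if low < value ∧ value < high then compared_list ++ [value] else compared_list) []

def list_division_loop (list_variable : List Int) (highest_value : Int)
    (base_value : Int) (divided_list : List (List Int)) : List (List Int) :=
  if base_value < highest_value then
    list_division_loop list_variable highest_value (base_value + 4000)
      (divided_list ++ [list_compare list_variable base_value (base_value + 4000)])
  else divided_list
termination_by (highest_value - base_value).toNat
decreasing_by omega

def list_division (list_variable : List Int) : List (List Int) :=
  match PySem.List.pyGet? (PySem.List.sorted list_variable (fun x => x) false)
      ((list_variable.length : Int) - 1) with
  | none => []   -- empty list: Python raises IndexError; excluded by Pre_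
  | some highest_value => list_division_loop list_variable highest_value 1000 []

-- ===== PORT B =====
-- buckets[i].append(v); an out-of-range index never occurs on reachable states (every value ≤ max)
def bucketAdd (buckets : List (List Int)) (i : Nat) (v : Int) : List (List Int) :=
  match buckets, i with
  | [], _ => []
  | b :: rest, 0 => (b ++ [v]) :: rest
  | b :: rest, Nat.succ j => b :: bucketAdd rest j v

def list_division_alt (list_variable : List Int) : List (List Int) :=
  match PySem.List.max? list_variable (fun x => x) with
  | none => []   -- empty list: Python raises ValueError; excluded by Pre_
  | some highest =>
    if highest ≤ 1000 then []
    else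
      list_variable.foldl (fun buckets value =>
        if 1000 < value ∧ PySem.Int.mod (value - 1000) 4000 ≠ 0 then
          bucketAdd buckets (PySem.Int.floordiv (value - 1001) 4000).toNat value
        else buckets)
        (List.replicate (PySem.Int.floordiv (highest - 1001) 4000 + 1).toNat [])

-- ===== PRECONDITION & SPEC =====
-- Pre_ excludes only the empty list, on which A raises IndexError (and B raises ValueError).
def Pre_list_division (list_variable : List Int) : Prop := list_variable ≠ []
instance (list_variable : List Int) : Decidable (Pre_list_division list_variable) := by
  unfold Pre_list_division; infer_instance
def pvWitness_list_division : List Int := [4500]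

def Spec_list_division (list_variable : List Int) (out : List (List Int)) : Prop := out = list_division_alt list_variable
instance (list_variable : List Int) (out : List (List Int)) : Decidable (Spec_list_division list_variable out) := by unfold Spec_list_division; infer_instance

-- ===== CLAIM (what is proved, stated in full; the proofs are below) =====
def Claim_equal_list_division : Prop := ∀ (list_variable : List Int), Dom_list_division list_variable → Pre_list_division list_variable → Spec_list_division list_variable (list_division list_variable)

-- ===== LEMMAS AND PROOFS =====

-- number of iterations of A's while loop: ceil((highest - base)/4000), 0 when base ≥ highest
def pvNsteps (h base : Int) : Nat := (h - base + 3999).toNat / 4000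

theorem list_compare_eq_filter (l : List Int) (low high : Int) :
    list_compare l low high = l.filter (fun v => decide (low < v ∧ v < high)) := by
  unfold list_compare
  exact PySem.List.foldl_append_ite_eq_filter (fun x => low < x ∧ x < high) l []

theorem loop_eq (l : List Int) (h : Int) : ∀ (n : Nat) (base : Int) (d : List (List Int)),
    pvNsteps h base = n →
    list_division_loop l h base d
      = d ++ (List.range n).map
          (fun i : Nat => list_compare l (base + 4000 * (i : Int)) (base + 4000 * (i : Int) + 4000)) := by
  intro n
  induction n with
  | zero =>
    intro base d hn
    have hb : ¬ base < h := by unfold pvNsteps at hn; omega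
    rw [list_division_loop]
    simp [hb]
  | succ m ih =>
    intro base d hn
    have hb : base < h := by unfold pvNsteps at hn; omega
    have hn' : pvNsteps h (base + 4000) = m := by unfold pvNsteps at hn ⊢; omega
    rw [list_division_loop]
    rw [if_pos hb]
    rw [ih (base + 4000) _ hn']
    rw [List.range_succ_eq_map, List.map_cons, List.map_map]
    simp only [List.append_assoc, List.singleton_append, Nat.cast_zero, mul_zero, add_zero]
    congr 2
    apply List.map_congr_left
    intro i _
    simp only [Function.comp_apply]
    congr 1 <;> push_cast <;> ring

theorem bucketAdd_get? (bs : List (List Int)) : ∀ (i : Nat) (v : Int) (j : Nat),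
    (bucketAdd bs i v)[j]? = if i = j then (bs[j]?).map (· ++ [v]) else bs[j]? := by
  induction bs with
  | nil => intro i v j; simp [bucketAdd]
  | cons b rest ih =>
    intro i v j
    cases i with
    | zero =>
      cases j with
      | zero => simp [bucketAdd]
      | succ j' => simp [bucketAdd]
    | succ i' =>
      cases j with
      | zero => simp [bucketAdd]
      | succ j' => simpa [bucketAdd] using ih i' v j'

theorem foldB_get? (l : List Int) : ∀ (bs : List (List Int)) (j : Nat),
    (l.foldl (fun buckets value =>
        if 1000 < value ∧ PySem.Int.mod (value - 1000) 4000 ≠ 0 then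
          bucketAdd buckets (PySem.Int.floordiv (value - 1001) 4000).toNat value
        else buckets) bs)[j]?
      = (bs[j]?).map (· ++ l.filter (fun v =>
          decide ((1000 < v ∧ PySem.Int.mod (v - 1000) 4000 ≠ 0) ∧
            (PySem.Int.floordiv (v - 1001) 4000).toNat = j))) := by
  induction l with
  | nil =>
    intro bs j
    simp
  | cons v t ih =>
    intro bs j
    rw [List.foldl_cons, ih]
    by_cases hc : 1000 < v ∧ PySem.Int.mod (v - 1000) 4000 ≠ 0
    · rw [if_pos hc, bucketAdd_get?]
      by_cases hj : (PySem.Int.floordiv (v - 1001) 4000).toNat = j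
      · rw [if_pos hj, List.filter_cons,
          if_pos (show _ = true by rw [decide_eq_true_eq]; exact ⟨hc, hj⟩)]
        cases hb : bs[j]? with
        | none => rfl
        | some b =>
          simp only [Option.map_some, Option.some.injEq]
          rw [List.append_assoc, List.singleton_append]
      · rw [if_neg hj, List.filter_cons,
          if_neg (show ¬ _ = true by rw [decide_eq_true_eq]; exact fun hh => hj hh.2)]
    · rw [if_neg hc, List.filter_cons,
        if_neg (show ¬ _ = true by rw [decide_eq_true_eq]; exact fun hh => hc hh.1)]

-- the interval test A uses for bucket j coincides with B's index test
theorem pred_iff (j : Nat) (v : Int) :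
    ((1000 + 4000 * (j : Int) < v ∧ v < 1000 + 4000 * (j : Int) + 4000)) ↔
    ((1000 < v ∧ PySem.Int.mod (v - 1000) 4000 ≠ 0) ∧
      (PySem.Int.floordiv (v - 1001) 4000).toNat = j) := by
  rw [PySem.Int.mod_eq_emod_of_pos (by norm_num), PySem.Int.floordiv_eq_ediv_of_pos (by norm_num)]
  omega

theorem sorted_last_eq_max (l : List Int) (hl : l ≠ []) (m : Int)
    (hm : PySem.List.max? l (fun x => x) = some m) :
    PySem.List.pyGet? (PySem.List.sorted l (fun x => x) false) ((l.length : Int) - 1)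
      = some m := by
  have hlen : (PySem.List.sorted l (fun x => x) false).length = l.length :=
    PySem.List.length_sorted l (fun x => x) false
  have hpos : 0 < l.length := List.length_pos_iff.mpr hl
  have h0 : (0 : Int) ≤ (l.length : Int) - 1 := by omega
  have h1 : (l.length : Int) - 1 < ((PySem.List.sorted l (fun x => x) false).length : Int) := by
    rw [hlen]; omega
  rw [PySem.List.pyGet?_eq_some_getElem _ h0 (by exact_mod_cast h1)]
  have hidx : ((l.length : Int) - 1).toNat < (PySem.List.sorted l (fun x => x) false).length := by
    omega
  congr 1
  have hmem : (PySem.List.sorted l (fun x => x) false)[((l.length : Int) - 1).toNat] ∈ l := by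
    rw [← PySem.List.mem_sorted l (fun x => x) false]
    exact List.getElem_mem hidx
  have hle : (PySem.List.sorted l (fun x => x) false)[((l.length : Int) - 1).toNat] ≤ m :=
    PySem.List.max?_isMax hm _ hmem
  have hmems : m ∈ PySem.List.sorted l (fun x => x) false := by
    rw [PySem.List.mem_sorted]
    exact PySem.List.max?_mem hm
  obtain ⟨i, hi, heq⟩ := List.getElem_of_mem hmems
  have hge : m ≤ (PySem.List.sorted l (fun x => x) false)[((l.length : Int) - 1).toNat] := by
    rw [← heq]
    exact PySem.List.sorted_id_getElem_mono l (by omega) hidx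
  exact le_antisymm hle hge

-- ===== VERDICT (by name: the statement is the Claim_ definition above) =====
theorem list_division_spec : Claim_equal_list_division := by
  intro l _ hpre
  unfold Spec_list_division
  obtain ⟨m, hm⟩ : ∃ m, PySem.List.max? l (fun x => x) = some m := by
    cases h : PySem.List.max? l (fun x => x) with
    | none => exact absurd ((PySem.List.max?_eq_none_iff l _).mp h) hpre
    | some m => exact ⟨m, rfl⟩
  unfold list_division list_division_alt
  rw [sorted_last_eq_max l hpre m hm, hm]
  dsimp only
  by_cases hle : m ≤ 1000
  · rw [loop_eq l m 0 1000 [] (by unfold pvNsteps; omega)]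
    simp [hle]
  · rw [if_neg hle]
    rw [loop_eq l m (pvNsteps m 1000) 1000 [] rfl, List.nil_append]
    have hkN : pvNsteps m 1000 = (PySem.Int.floordiv (m - 1001) 4000 + 1).toNat := by
      unfold pvNsteps
      rw [PySem.Int.floordiv_eq_ediv_of_pos (by norm_num)]
      omega
    apply List.ext_getElem?
    intro j
    rw [foldB_get?, List.getElem?_map, List.getElem?_replicate]
    by_cases hj : j < pvNsteps m 1000
    · rw [List.getElem?_range hj, if_pos (by omega)]
      simp only [Option.map_some, Option.some.injEq, List.nil_append]
      rw [list_compare_eq_filter]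
      apply List.filter_congr
      intro v _
      simp only [decide_eq_decide]
      exact pred_iff j v
    · rw [List.getElem?_eq_none (by simpa using hj), if_neg (by omega)]
      rfl
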